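-- pv_equiv track=rewrite | github.com/abin7-alpha/Solutions-think-python | chapter12/exercise5.py | metathesis
-- ===== SOURCE A (Python) =====
-- def metathesis(word1, word2):
--     if len(word1) != len(word2):
--         return False
--     a = zip(word1,word2)
--     if sorted(word1) == sorted(word2):
--         count = 0
--         if word1 == word2:
--             return False
--         for i,j in a:
--             if i != j:
--                 count = count + 1
--         if count == 2:
--             return True
--         if count > 2:
--             return False
--     else:
--         return False
-- ===== SOURCE B (Python) =====
-- def metathesis(word1, word2):
--     if len(word1) != len(word2):
--         return False
--     diffs = [(c1, c2) for c1, c2 in zip(word1, word2) if c1 != c2]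
--     if len(diffs) != 2:
--         return False
--     (x, y), (u, v) = diffs
--     return x == v and y == u
-- ===== Notes on version B (the rewrite author's own statement) =====
-- stated objective: simpler
-- what changed: B drops A's sort-based anagram test and mismatch counting entirely: it collects the mismatching character pairs in one linear pass and checks directly that they form a transposition, which is equivalent to anagram-with-exactly-2-mismatches.
import Mathlib
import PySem

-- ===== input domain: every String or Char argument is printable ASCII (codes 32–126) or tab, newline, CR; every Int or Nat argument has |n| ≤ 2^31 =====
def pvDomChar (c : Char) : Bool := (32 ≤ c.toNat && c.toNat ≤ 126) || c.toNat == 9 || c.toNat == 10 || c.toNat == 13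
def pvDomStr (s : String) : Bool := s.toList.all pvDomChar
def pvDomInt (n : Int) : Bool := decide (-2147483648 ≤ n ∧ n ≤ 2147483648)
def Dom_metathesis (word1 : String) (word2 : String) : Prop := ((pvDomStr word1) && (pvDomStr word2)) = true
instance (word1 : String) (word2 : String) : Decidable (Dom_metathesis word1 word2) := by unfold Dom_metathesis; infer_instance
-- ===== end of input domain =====

-- B replaces A's sort-based anagram test plus mismatch counting by a single pass that collects
-- the mismatching character pairs and checks that they form a transposition, with no sorting (objective: simpler).

-- ===== PORT A =====
-- Literal port of A.  In Python, when the words are anagrams, unequal, and the mismatch count is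
-- 0 or 1, control falls off the end of the function (returning None); that situation is
-- unreachable (equal-length anagrams cannot differ in exactly one position, and 0 mismatches
-- means equality), so the final `else false` branch of the port is never taken.
def metathesis (word1 : String) (word2 : String) : Bool :=
  if PySem.Str.len word1 ≠ PySem.Str.len word2 then false
  else
    let a := word1.toList.zip word2.toList
    if PySem.List.sorted word1.toList (fun c => c) false
         = PySem.List.sorted word2.toList (fun c => c) false then
      if word1.toList = word2.toList then false
      else
        let count : Int := a.foldl (fun c p => if p.1 ≠ p.2 then c + 1 else c) 0
        if count = 2 then true
        else if count > 2 then false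
        else false  -- unreachable (Python would return None here)
    else false

-- ===== PORT B =====
def metathesis_alt (word1 : String) (word2 : String) : Bool :=
  if PySem.Str.len word1 ≠ PySem.Str.len word2 then false
  else
    match (word1.toList.zip word2.toList).filter (fun p => p.1 != p.2) with
    | [(x, y), (u, v)] => x == v && y == u
    | _ => false

-- ===== PRECONDITION & SPEC =====
def Spec_metathesis (word1 : String) (word2 : String) (out : Bool) : Prop := out = metathesis_alt word1 word2
instance (word1 : String) (word2 : String) (out : Bool) : Decidable (Spec_metathesis word1 word2 out) := by unfold Spec_metathesis; infer_instance

-- ===== CLAIM (what is proved, stated in full; the proofs are below) =====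
def Claim_equal_metathesis : Prop := ∀ (word1 : String) (word2 : String), Dom_metathesis word1 word2 → Spec_metathesis word1 word2 (metathesis word1 word2)

-- ===== LEMMAS AND PROOFS =====

-- A two-element permutation [x, u] ~ [y, v] is either an equality or a swap.
theorem pairPerm {α : Type} (x u y v : α) (h : ([x, u] : List α).Perm [y, v]) :
    (x = y ∧ u = v) ∨ (x = v ∧ u = y) := by
  by_cases hxy : x = y
  · subst hxy
    left
    refine ⟨rfl, ?_⟩
    simpa using (List.perm_cons x).mp h
  · have hx : x ∈ [y, v] := h.mem_iff.mp (by simp)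
    simp at hx
    rcases hx with hx | hx
    · exact absurd hx hxy
    · subst hx
      right
      refine ⟨rfl, ?_⟩
      have hy : y ∈ [x, u] := h.symm.mem_iff.mp (by simp)
      simp at hy
      rcases hy with hy | hy
      · exact absurd hy.symm hxy
      · exact hy.symm
theorem perm_iff_mismatch_perm {α : Type} [DecidableEq α] (p : List (α × α)) :
    (p.map Prod.fst).Perm (p.map Prod.snd) ↔
      ((p.filter (fun q => q.1 != q.2)).map Prod.fst).Perm
        ((p.filter (fun q => q.1 != q.2)).map Prod.snd) := by
  have hsplit : (p.filter (fun q => q.1 != q.2) ++ p.filter (fun q => !(q.1 != q.2))).Perm p :=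
    List.filter_append_perm _ p
  have hfst : ((p.filter (fun q => q.1 != q.2)).map Prod.fst
      ++ (p.filter (fun q => !(q.1 != q.2))).map Prod.fst).Perm (p.map Prod.fst) := by
    simpa [List.map_append] using hsplit.map Prod.fst
  have hsnd : ((p.filter (fun q => q.1 != q.2)).map Prod.snd
      ++ (p.filter (fun q => !(q.1 != q.2))).map Prod.snd).Perm (p.map Prod.snd) := by
    simpa [List.map_append] using hsplit.map Prod.snd
  have heq : (p.filter (fun q => !(q.1 != q.2))).map Prod.fst
      = (p.filter (fun q => !(q.1 != q.2))).map Prod.snd := by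
    apply List.map_congr_left
    intro q hq
    simpa using List.of_mem_filter hq
  constructor
  · intro h
    have h2 := (hfst.trans h).trans hsnd.symm
    rw [← heq] at h2
    exact (List.perm_append_right_iff _).mp h2
  · intro h
    have h2 := (List.perm_append_right_iff
      ((p.filter (fun q => !(q.1 != q.2))).map Prod.fst)).mpr h
    have h3 := (hfst.symm.trans h2)
    rw [heq] at h3
    exact h3.trans hsnd

theorem filter_zip_self {α : Type} [DecidableEq α] (l : List α) :
    (l.zip l).filter (fun q : α × α => q.1 != q.2) = [] := by
  induction l with
  | nil => simp
  | cons a t ih => simpa using ih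

theorem branch_eq (l1 l2 : List Char) (hlen : l1.length = l2.length) :
  (if PySem.List.sorted l1 (fun c => c) false = PySem.List.sorted l2 (fun c => c) false then
     if l1 = l2 then false
     else
       let count : Int := (l1.zip l2).foldl (fun c p => if p.1 ≠ p.2 then c + 1 else c) 0
       if count = 2 then true else if count > 2 then false else false
   else false)
  = (match (l1.zip l2).filter (fun p => p.1 != p.2) with
     | [(x, y), (u, v)] => x == v && y == u
     | _ => false) := by
  have hcount : (l1.zip l2).foldl (fun c q => if q.1 ≠ q.2 then c + 1 else c) (0:Int)
      = (((l1.zip l2).filter (fun q => q.1 != q.2)).length : Int) := by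
    have h := PySem.List.foldl_count_if (fun q : Char × Char => q.1 != q.2) (l1.zip l2) 0
    simp only [bne_iff_ne, ne_eq] at h ⊢
    rw [h, List.countP_eq_length_filter]
    simp
  simp only [ne_eq, ite_not] at hcount
  have hmfst : (l1.zip l2).map Prod.fst = l1 := List.map_fst_zip (le_of_eq hlen)
  have hmsnd : (l1.zip l2).map Prod.snd = l2 := List.map_snd_zip (le_of_eq hlen.symm)
  have hperm_iff : (PySem.List.sorted l1 (fun c => c) false
      = PySem.List.sorted l2 (fun c => c) false) ↔ l1.Perm l2 :=
    PySem.List.sorted_id_eq_sorted_id_iff_perm l1 l2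
  have hmm : l1.Perm l2 ↔
      (((l1.zip l2).filter (fun q => q.1 != q.2)).map Prod.fst).Perm
        (((l1.zip l2).filter (fun q => q.1 != q.2)).map Prod.snd) := by
    have h0 := perm_iff_mismatch_perm (l1.zip l2)
    rw [hmfst, hmsnd] at h0
    exact h0
  rcases hms : (l1.zip l2).filter (fun q => q.1 != q.2) with _ | ⟨⟨x, y⟩, _ | ⟨⟨u, v⟩, _ | ⟨w, rest⟩⟩⟩
  · -- no mismatching pair: the words are equal, both sides false
    have heq : l1 = l2 := by
      apply List.ext_getElem hlen
      intro i h1 h2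
      by_contra hne
      have hmem : (l1[i], l2[i]) ∈ (l1.zip l2) := by
        have hz : (l1.zip l2)[i]'(by simp [List.length_zip]; omega) = (l1[i], l2[i]) := by
          simp [List.getElem_zip]
        rw [← hz]
        exact List.getElem_mem _
      have hin : (l1[i], l2[i]) ∈ (l1.zip l2).filter (fun q => q.1 != q.2) :=
        List.mem_filter.mpr ⟨hmem, by simpa using hne⟩
      rw [hms] at hin
      simp at hin
    subst heq
    rw [filter_zip_self]
    simp
  · -- exactly one mismatching pair: count = 1, both sides false
    rw [hms] at hcount
    have hne12 : l1 ≠ l2 := by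
      intro hq
      subst hq
      rw [filter_zip_self] at hms
      simp at hms
    rw [hms]
    simp [hcount, hne12]
  · -- exactly two mismatching pairs
    rw [hms] at hcount
    have hmem1 : (x, y) ∈ (l1.zip l2).filter (fun q => q.1 != q.2) := by
      rw [hms]; exact List.mem_cons_self
    have hmem2 : (u, v) ∈ (l1.zip l2).filter (fun q => q.1 != q.2) := by
      rw [hms]; simp
    have hxy : x ≠ y := by simpa using (List.of_mem_filter hmem1)
    have hne12 : l1 ≠ l2 := by
      intro hq
      subst hq
      rw [filter_zip_self] at hms
      simp at hms
    by_cases hsorted : PySem.List.sorted l1 (fun c => c) false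
        = PySem.List.sorted l2 (fun c => c) false
    · -- anagrams with two mismatches: the mismatching pairs are a transposition, both sides true
      have hpp : ([x, u] : List Char).Perm [y, v] := by
        have h0 := hmm.mp (hperm_iff.mp hsorted)
        rw [hms] at h0
        simpa using h0
      rcases pairPerm x u y v hpp with ⟨h1, _⟩ | ⟨h1, h2⟩
      · exact absurd h1 hxy
      · rw [hms]
        simp [hcount, hsorted, hne12, h1, h2]
    · -- not anagrams: A is false, and the swap test must fail too
      have hswap : (x == v && y == u) = false := by
        rcases Decidable.em (x = v) with h1 | h1
        · rcases Decidable.em (y = u) with h2 | h2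
          · exfalso
            apply hsorted
            apply hperm_iff.mpr
            apply hmm.mpr
            rw [hms]
            simp only [List.map_cons, List.map_nil]
            rw [h1, h2]
            exact List.Perm.swap u v []
          · simp [h2]
        · simp [h1]
      rw [hms]
      simp [hsorted, hswap]
  · -- more than two mismatching pairs: count > 2, both sides false
    rw [hms] at hcount
    have hne12 : l1 ≠ l2 := by
      intro hq
      subst hq
      rw [filter_zip_self] at hms
      simp at hms
    rw [hms]
    simp [hcount, hne12]
    intro _
    omega

theorem metathesis_eq_alt (word1 word2 : String) :
    metathesis word1 word2 = metathesis_alt word1 word2 := by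
  unfold metathesis metathesis_alt
  by_cases hlen : PySem.Str.len word1 = PySem.Str.len word2
  · have hlen' : word1.toList.length = word2.toList.length := by
      have h1 := PySem.Str.len_eq word1
      have h2 := PySem.Str.len_eq word2
      rw [h1, h2] at hlen
      exact_mod_cast hlen
    simp only [hlen, ne_eq, not_true_eq_false, if_false]
    exact branch_eq _ _ hlen'
  · rw [if_pos hlen, if_pos hlen]

-- ===== VERDICT (by name: the statement is the Claim_ definition above) =====
theorem metathesis_spec : Claim_equal_metathesis := by
  intro word1 word2 _
  unfold Spec_metathesis
  exact metathesis_eq_alt word1 word2
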